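-- pv_equiv track=rewrite | github.com/AAtithe/Aimelia | ws-aimelia/apps/api/app/triage.py | quick_rules
-- ===== SOURCE A (Python) =====
-- from typing import Dict, Any, Optional
--
-- def quick_rules(subject: str, sender: str) -> Optional[str]:
--     """
--     Quick rule-based classification for obvious categories.
--
--     Args:
--         subject: Email subject
--         sender: Sender email address
--
--     Returns:
--         Category name or None if no rules match
--     """
--     s = (subject or "").lower()
--     f = (sender or "").lower()
--
--     if any(k in s for k in ["payslip", "timesheet", "payroll"]):
--         return "Payroll"
--     if any(k in s for k in ["vat", "paye", "nic", "hmrc"]):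
--         return "Tax"
--     if "meeting" in s or "calendar" in s:
--         return "Scheduling"
--     if any(k in s for k in ["urgent", "asap", "immediately"]):
--         return "Urgent"
--     if any(k in f for k in ["noreply", "no-reply", "automated"]):
--         return "Automated"
--
--     return None
-- ===== SOURCE B (Python) =====
-- # One flat keyword -> (priority, category, field) map; a single pass over all keywords
-- # keeps the best (lowest-priority-number) matching category instead of an if-chain
-- # that returns on the first matching rule.
-- KEYWORD_RULES = {
--     "payslip": (0, "Payroll", False),
--     "timesheet": (0, "Payroll", False),
--     "payroll": (0, "Payroll", False),
--     "vat": (1, "Tax", False),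
--     "paye": (1, "Tax", False),
--     "nic": (1, "Tax", False),
--     "hmrc": (1, "Tax", False),
--     "meeting": (2, "Scheduling", False),
--     "calendar": (2, "Scheduling", False),
--     "urgent": (3, "Urgent", False),
--     "asap": (3, "Urgent", False),
--     "immediately": (3, "Urgent", False),
--     "noreply": (4, "Automated", True),
--     "no-reply": (4, "Automated", True),
--     "automated": (4, "Automated", True),
-- }
--
-- def quick_rules(subject, sender):
--     s = (subject or "").lower()
--     f = (sender or "").lower()
--     best = None
--     for kw, (prio, cat, use_sender) in KEYWORD_RULES.items():
--         if kw in (f if use_sender else s):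
--             if best is None or prio < best[0]:
--                 best = (prio, cat)
--     return best[1] if best is not None else None
-- ===== Notes on version B (the rewrite author's own statement) =====
-- stated objective: alternative
-- what changed: Replaced the short-circuiting if-chain with a flat keyword->(priority,category,field) map scanned in ONE exhaustive pass that accumulates the minimum-priority matching category (collect-all-then-select instead of return-on-first-rule).
import Mathlib
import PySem

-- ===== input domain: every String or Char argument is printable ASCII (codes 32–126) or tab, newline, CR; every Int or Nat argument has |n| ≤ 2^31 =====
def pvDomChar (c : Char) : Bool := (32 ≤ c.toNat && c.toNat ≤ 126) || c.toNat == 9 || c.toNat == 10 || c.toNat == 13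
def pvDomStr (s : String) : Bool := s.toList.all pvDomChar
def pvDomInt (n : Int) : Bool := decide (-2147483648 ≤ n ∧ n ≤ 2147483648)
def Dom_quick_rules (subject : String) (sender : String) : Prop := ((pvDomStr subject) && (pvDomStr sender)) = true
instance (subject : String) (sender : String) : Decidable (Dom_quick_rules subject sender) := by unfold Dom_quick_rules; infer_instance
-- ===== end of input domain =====

-- B replaces A's short-circuit if-chain by one exhaustive pass over a flat keyword map that
-- accumulates the minimum-priority matching category (objective: alternative).


-- ===== PORT A =====
def quick_rules (subject : String) (sender : String) : Option String :=
  let s := PySem.Str.lower (if subject = "" then "" else subject)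
  let f := PySem.Str.lower (if sender = "" then "" else sender)
  if ["payslip", "timesheet", "payroll"].any (fun k => PySem.Str.isIn k s) then some "Payroll"
  else if ["vat", "paye", "nic", "hmrc"].any (fun k => PySem.Str.isIn k s) then some "Tax"
  else if PySem.Str.isIn "meeting" s || PySem.Str.isIn "calendar" s then some "Scheduling"
  else if ["urgent", "asap", "immediately"].any (fun k => PySem.Str.isIn k s) then some "Urgent"
  else if ["noreply", "no-reply", "automated"].any (fun k => PySem.Str.isIn k f) then some "Automated"
  else none

-- ===== PORT B =====
-- flat keyword map, in Source B's insertion order: keyword ↦ (priority, category, use-sender?)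
def qrKeywordRules : List (String × Nat × String × Bool) :=
  [("payslip", 0, "Payroll", false), ("timesheet", 0, "Payroll", false), ("payroll", 0, "Payroll", false),
   ("vat", 1, "Tax", false), ("paye", 1, "Tax", false), ("nic", 1, "Tax", false), ("hmrc", 1, "Tax", false),
   ("meeting", 2, "Scheduling", false), ("calendar", 2, "Scheduling", false),
   ("urgent", 3, "Urgent", false), ("asap", 3, "Urgent", false), ("immediately", 3, "Urgent", false),
   ("noreply", 4, "Automated", true), ("no-reply", 4, "Automated", true), ("automated", 4, "Automated", true)]

-- the loop body of Source B: keep the lowest-priority matching (priority, category)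
def qrStep (s f : String) (best : Option (Nat × String)) (r : String × Nat × String × Bool) :
    Option (Nat × String) :=
  if PySem.Str.isIn r.1 (if r.2.2.2 then f else s) then
    match best with
    | none => some (r.2.1, r.2.2.1)
    | some b => if r.2.1 < b.1 then some (r.2.1, r.2.2.1) else some b
  else best

def quick_rules_alt (subject : String) (sender : String) : Option String :=
  let s := PySem.Str.lower (if subject = "" then "" else subject)
  let f := PySem.Str.lower (if sender = "" then "" else sender)
  let best := qrKeywordRules.foldl (qrStep s f) none
  match best with
  | some b => some b.2
  | none => none

-- ===== PRECONDITION & SPEC =====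
def Spec_quick_rules (subject : String) (sender : String) (out : Option String) : Prop := out = quick_rules_alt subject sender
instance (subject : String) (sender : String) (out : Option String) : Decidable (Spec_quick_rules subject sender out) := by unfold Spec_quick_rules; infer_instance

-- ===== CLAIM (what is proved, stated in full; the proofs are below) =====
def Claim_equal_quick_rules : Prop := ∀ (subject : String) (sender : String), Dom_quick_rules subject sender → Spec_quick_rules subject sender (quick_rules subject sender)

-- ===== LEMMAS AND PROOFS =====

-- once the accumulator holds a match and all remaining priorities are ≥ its own, it is frozen
theorem qrFreeze (s f : String) (b : Nat × String) (l : List (String × Nat × String × Bool))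
    (h : ∀ r ∈ l, b.1 ≤ r.2.1) : l.foldl (qrStep s f) (some b) = some b := by
  induction l with
  | nil => rfl
  | cons a l ih =>
    have ha : ¬ a.2.1 < b.1 := not_lt.mpr (h a (List.mem_cons_self))
    have ih' := ih (fun r hr => h r (List.mem_cons_of_mem _ hr))
    have hstep : qrStep s f (some b) a = some b := by
      unfold qrStep
      by_cases hm : PySem.Str.isIn a.1 (if a.2.2.2 then f else s) = true
      · rw [if_pos hm]; exact if_neg ha
      · rw [if_neg hm]
    rw [List.foldl_cons, hstep]; exact ih'

-- with nondecreasing priorities, Source B's min-priority fold selects the FIRST matching entry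
theorem qrFold_none (s f : String) (l : List (String × Nat × String × Bool))
    (h : l.Pairwise (fun a c => a.2.1 ≤ c.2.1)) :
    l.foldl (qrStep s f) none
      = (l.find? (fun r => PySem.Str.isIn r.1 (if r.2.2.2 then f else s))).map
          (fun r => (r.2.1, r.2.2.1)) := by
  induction l with
  | nil => rfl
  | cons a l ih =>
    rcases List.pairwise_cons.mp h with ⟨ha, hl⟩
    rw [List.foldl_cons, List.find?_cons]
    cases hb : PySem.Str.isIn a.1 (if a.2.2.2 then f else s) with
    | true =>
      have hstep : qrStep s f none a = some (a.2.1, a.2.2.1) := by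
        unfold qrStep; rw [if_pos hb]
      rw [hstep, qrFreeze s f (a.2.1, a.2.2.1) l ha]
      simp
    | false =>
      have hstep : qrStep s f none a = none := by
        unfold qrStep; rw [if_neg (ne_true_of_eq_false hb)]
      rw [hstep, ih hl]

-- ===== VERDICT (by name: the statement is the Claim_ definition above) =====
set_option maxHeartbeats 2000000 in
theorem quick_rules_spec : Claim_equal_quick_rules := by
  intro subject sender _
  simp only [Spec_quick_rules, quick_rules, quick_rules_alt]
  rw [qrFold_none _ _ _ (by decide)]
  simp only [qrKeywordRules, List.find?_cons, List.find?_nil, List.any_cons, List.any_nil, Bool.or_false,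
    Bool.false_eq_true, if_true, if_false]
  generalize PySem.Str.lower (if subject = "" then "" else subject) = s
  generalize PySem.Str.lower (if sender = "" then "" else sender) = f
  generalize PySem.Str.isIn "payslip" s = x0
  generalize PySem.Str.isIn "timesheet" s = x1
  generalize PySem.Str.isIn "payroll" s = x2
  generalize PySem.Str.isIn "vat" s = x3
  generalize PySem.Str.isIn "paye" s = x4
  generalize PySem.Str.isIn "nic" s = x5
  generalize PySem.Str.isIn "hmrc" s = x6
  generalize PySem.Str.isIn "meeting" s = x7
  generalize PySem.Str.isIn "calendar" s = x8
  generalize PySem.Str.isIn "urgent" s = x9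
  generalize PySem.Str.isIn "asap" s = x10
  generalize PySem.Str.isIn "immediately" s = x11
  generalize PySem.Str.isIn "noreply" f = y0
  generalize PySem.Str.isIn "no-reply" f = y1
  generalize PySem.Str.isIn "automated" f = y2
  revert x0 x1 x2 x3 x4 x5 x6 x7 x8 x9 x10 x11 y0 y1 y2
  decide
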